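-- pv_equiv track=rewrite | github.com/DenisGazizov/algo | YP_6/G_queue_in_PVZ.py | func
-- ===== SOURCE A (Python) =====
-- def func(n, b, a):
--     res = 0
--     rem = 0
--     for i in range(n):
--         temp = a[i] + rem
--         if temp <= b:
--             res += temp
--             rem = 0
--         else:
--             res += temp
--             rem = temp - b
--     res += rem
--     return res
-- ===== SOURCE B (Python) =====
-- def func(n, b, a):
--     # prefix-sum formulation: with c[i] = sum(a[:i]) - i*b, the queue's leftover after
--     # step i equals c[i] - min(c[0..i]); the answer is sum(a[:n]) plus all those leftovers.
--     c = [0]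
--     for i in range(n):
--         c.append(c[-1] + a[i] - b)
--     res = c[-1] + (len(c) - 1) * b   # = sum(a[:n])
--     m = 0
--     for x in c[1:]:
--         m = min(m, x)
--         res += x - m
--     return res
-- ===== Notes on version B (the rewrite author's own statement) =====
-- stated objective: alternative
-- what changed: B abandons the carry recurrence entirely: it materialises the prefix-sum array c[i] = sum(a[:i]) - i*b, then uses the identity 'leftover after step i = c[i] - running minimum of c[0..i]' to compute the answer as sum(a[:n]) plus those leftovers.
import Mathlib
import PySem

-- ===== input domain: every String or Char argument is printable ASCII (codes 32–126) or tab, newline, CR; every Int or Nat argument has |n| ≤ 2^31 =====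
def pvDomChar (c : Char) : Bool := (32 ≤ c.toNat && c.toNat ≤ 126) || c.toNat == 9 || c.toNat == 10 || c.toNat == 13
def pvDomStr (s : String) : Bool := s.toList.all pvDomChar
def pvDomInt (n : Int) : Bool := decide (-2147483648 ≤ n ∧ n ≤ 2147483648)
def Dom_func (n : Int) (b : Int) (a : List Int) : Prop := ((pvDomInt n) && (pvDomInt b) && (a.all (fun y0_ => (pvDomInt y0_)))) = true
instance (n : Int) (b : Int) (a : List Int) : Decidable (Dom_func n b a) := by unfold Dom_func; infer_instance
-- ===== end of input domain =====

-- B replaces A's carry simulation by a prefix-sum array plus running-minimum identity; same O(n) cost (objective: alternative).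

-- ===== PORT A =====
def func (n : Int) (b : Int) (a : List Int) : Int :=
  let st := (PySem.List.pyRange 0 n 1).foldl (fun (st : Int × Int) i =>
    let temp := PySem.List.pyGetD a i 0 + st.2
    if temp ≤ b then (st.1 + temp, 0) else (st.1 + temp, temp - b)) (0, 0)
  st.1 + st.2

-- ===== PORT B =====
def func_alt (n : Int) (b : Int) (a : List Int) : Int :=
  let c := (PySem.List.pyRange 0 n 1).foldl
    (fun (c : List Int) i => c ++ [PySem.List.pyGetD c (-1) 0 + PySem.List.pyGetD a i 0 - b]) [0]
  let res := PySem.List.pyGetD c (-1) 0 + ((c.length : Int) - 1) * b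
  ((PySem.List.slice c (some 1) none).foldl (fun (st : Int × Int) x =>
      let m := min st.2 x
      (st.1 + (x - m), m)) (res, 0)).1

-- ===== PRECONDITION & SPEC =====
-- Pre_ excludes exactly the inputs where A raises IndexError (n exceeding len(a)).
def Pre_func (n : Int) (b : Int) (a : List Int) : Prop := n ≤ (a.length : Int)
instance (n : Int) (b : Int) (a : List Int) : Decidable (Pre_func n b a) := by unfold Pre_func; infer_instance
def pvWitness_func : Int × Int × List Int := (2, 3, [5, 1, 2])
def Spec_func (n : Int) (b : Int) (a : List Int) (out : Int) : Prop := out = func_alt n b a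
instance (n : Int) (b : Int) (a : List Int) (out : Int) : Decidable (Spec_func n b a out) := by unfold Spec_func; infer_instance

-- ===== CLAIM (what is proved, stated in full; the proofs are below) =====
def Claim_equal_func : Prop := ∀ (n : Int) (b : Int) (a : List Int), Dom_func n b a → Pre_func n b a → Spec_func n b a (func n b a)

-- ===== LEMMAS AND PROOFS =====

-- c-values of B: cvals b xs c0 = the prefix list [c0+x1-b, c0+x1+x2-2b, …]
def cvals (b : Int) : List Int → Int → List Int
  | [], _ => []
  | x :: t, c0 => (c0 + x - b) :: cvals b t (c0 + x - b)

-- B's building loop produces p ++ cvals of the remaining items, last element tracked.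
theorem pv_build (b : Int) (xs : List Int) : ∀ (p : List Int) (y : Int),
    xs.foldl (fun (c : List Int) x => c ++ [PySem.List.pyGetD c (-1) 0 + x - b]) (p ++ [y])
    = (p ++ [y]) ++ cvals b xs y := by
  induction xs with
  | nil => intro p y; simp [cvals]
  | cons x t ih =>
    intro p y
    simp only [List.foldl, cvals]
    rw [PySem.List.pyGetD_neg_one_append_singleton]
    have := ih (p ++ [y]) (y + x - b)
    simpa using this

theorem pv_cvals_last (b : Int) (xs : List Int) : ∀ (c0 : Int),
    (c0 :: cvals b xs c0).getLast (by simp) = c0 + xs.sum - (xs.length : Int) * b := by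
  induction xs with
  | nil => intro c0; simp [cvals]
  | cons x t ih =>
    intro c0
    simp only [cvals]
    rw [List.getLast_cons (by simp)]
    rw [ih (c0 + x - b)]
    simp only [List.sum_cons, List.length_cons]
    push_cast
    ring

theorem pv_cvals_len (b : Int) (xs : List Int) : ∀ c0, (cvals b xs c0).length = xs.length := by
  induction xs with
  | nil => intro c0; simp [cvals]
  | cons x t ih => intro c0; simp [cvals, ih]

-- Main invariant: A's res+rem equals B's leftover loop started at R+rem+sum xs,
-- provided rem = c0 - m0 and m0 ≤ c0.
theorem pv_key (b : Int) (xs : List Int) : ∀ (R rem c0 m0 : Int), rem = c0 - m0 → m0 ≤ c0 →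
    (xs.foldl (fun (st : Int × Int) x =>
        let temp := x + st.2
        if temp ≤ b then (st.1 + temp, 0) else (st.1 + temp, temp - b)) (R, rem)).1
    + (xs.foldl (fun (st : Int × Int) x =>
        let temp := x + st.2
        if temp ≤ b then (st.1 + temp, 0) else (st.1 + temp, temp - b)) (R, rem)).2
    = ((cvals b xs c0).foldl (fun (st : Int × Int) x =>
        let m := min st.2 x
        (st.1 + (x - m), m)) (R + rem + xs.sum, m0)).1 := by
  induction xs with
  | nil => intro R rem c0 m0 h1 _; simp [cvals]
  | cons x t ih =>
    intro R rem c0 m0 h1 h2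
    simp only [List.foldl, cvals, List.sum_cons]
    by_cases h : x + rem ≤ b
    · rw [if_pos h]
      have hm : min m0 (c0 + x - b) = c0 + x - b := by omega
      have := ih (R + (x + rem)) 0 (c0 + x - b) (c0 + x - b) (by omega) le_rfl
      rw [hm]
      rw [show R + rem + (x + t.sum) + (c0 + x - b - (c0 + x - b)) = R + (x + rem) + 0 + t.sum by ring]
      exact this
    · rw [if_neg h]
      have hm : min m0 (c0 + x - b) = m0 := by omega
      have := ih (R + (x + rem)) (x + rem - b) (c0 + x - b) m0 (by omega) (by omega)
      rw [hm]
      rw [show R + rem + (x + t.sum) + (c0 + x - b - m0) = R + (x + rem) + (x + rem - b) + t.sum by omega]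
      exact this

-- ===== VERDICT (by name: the statement is the Claim_ definition above) =====
theorem func_spec : Claim_equal_func := by
  intro n b a _ _
  unfold Spec_func func func_alt
  -- rewrite both folds over indices as folds over the list of fetched values
  set g : Int → Int := fun i => PySem.List.pyGetD a i 0 with hg
  set xs : List Int := (PySem.List.pyRange 0 n 1).map g with hxs
  have hA : (PySem.List.pyRange 0 n 1).foldl (fun (st : Int × Int) i =>
      let temp := PySem.List.pyGetD a i 0 + st.2
      if temp ≤ b then (st.1 + temp, 0) else (st.1 + temp, temp - b)) (0, 0)
      = xs.foldl (fun (st : Int × Int) x =>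
      let temp := x + st.2
      if temp ≤ b then (st.1 + temp, 0) else (st.1 + temp, temp - b)) (0, 0) := by
    rw [hxs, List.foldl_map]
  have hC : (PySem.List.pyRange 0 n 1).foldl
      (fun (c : List Int) i => c ++ [PySem.List.pyGetD c (-1) 0 + PySem.List.pyGetD a i 0 - b]) [0]
      = 0 :: cvals b xs 0 := by
    have h1 : (PySem.List.pyRange 0 n 1).foldl
        (fun (c : List Int) i => c ++ [PySem.List.pyGetD c (-1) 0 + PySem.List.pyGetD a i 0 - b]) [0]
        = xs.foldl (fun (c : List Int) x => c ++ [PySem.List.pyGetD c (-1) 0 + x - b]) [0] := by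
      rw [hxs, List.foldl_map]
    rw [h1]
    simpa using pv_build b xs ([] : List Int) 0
  simp only [hA, hC]
  have hlast : PySem.List.pyGetD (0 :: cvals b xs 0) (-1) 0
      = xs.sum - (xs.length : Int) * b := by
    rw [PySem.List.pyGetD_neg_one (0 :: cvals b xs 0) 0 (by simp), pv_cvals_last b xs 0]
    ring
  have hslice : PySem.List.slice (0 :: cvals b xs 0) (some 1) none = cvals b xs 0 := by
    rw [PySem.List.slice_from_one]; rfl
  have hlen : (((0 :: cvals b xs 0).length : Int) - 1) = (xs.length : Int) := by
    simp [pv_cvals_len]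
  simp only [hlast, hslice, hlen]
  have hres : xs.sum - (xs.length : Int) * b + (xs.length : Int) * b = 0 + 0 + xs.sum := by ring
  rw [hres]
  exact pv_key b xs 0 0 0 0 (by ring) le_rfl
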